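-- pv_equiv track=rewrite | github.com/hack-ink/vibe-style | scripts/rust-style-check.py | find_top_level_item_end_line
-- ===== SOURCE A (Python) =====
-- def strip_string_and_line_comment_with_state(
--     line: str, in_str: bool
-- ) -> tuple[str, bool]:
--     out: list[str] = []
--     escape = False
--     i = 0
--
--     while i < len(line):
--         ch = line[i]
--         nxt = line[i + 1] if i + 1 < len(line) else ""
--
--         if in_str:
--             if escape:
--                 escape = False
--             elif ch == "\\":
--                 escape = True
--             elif ch == '"':
--                 in_str = False
--             out.append(" ")
--             i += 1
--             continue
--
--         if ch == '"':
--             in_str = True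
--             out.append(" ")
--             i += 1
--             continue
--
--         if ch == "/" and nxt == "/":
--             break
--
--         out.append(ch)
--         i += 1
--
--     return "".join(out), in_str
--
-- def strip_string_and_line_comment(line: str) -> str:
--     stripped, _ = strip_string_and_line_comment_with_state(line, in_str=False)
--     return stripped
--
-- def find_top_level_item_end_line(lines: list[str], start_idx: int) -> int:
--     depth = 0
--     seen_open = False
--
--     for idx in range(start_idx, len(lines)):
--         code = strip_string_and_line_comment(lines[idx])
--         stripped = code.strip()
--
--         if not seen_open and "{" in code:
--             seen_open = True
--
--         depth += code.count("{")
--         depth -= code.count("}")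
--
--         if seen_open:
--             if depth <= 0:
--                 return idx
--         elif stripped.endswith(";"):
--             return idx
--
--     return start_idx
-- ===== SOURCE B (Python) =====
-- def find_top_level_item_end_line(lines: list[str], start_idx: int) -> int:
--     # One flat character scanner per line: no intermediate stripped string is
--     # built; depth, a per-line "had an open brace" flag and the last
--     # significant (non-string, non-comment, non-whitespace) character are
--     # maintained directly while walking the characters.
--     depth = 0
--     seen_open = False
--     for idx in range(start_idx, len(lines)):
--         line = lines[idx]
--         in_str = False
--         escape = False
--         had_open = False
--         last = ""
--         j = 0
--         n = len(line)
--         while j < n: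
--             ch = line[j]
--             if in_str:
--                 if escape:
--                     escape = False
--                 elif ch == "\\":
--                     escape = True
--                 elif ch == '"':
--                     in_str = False
--                 j += 1
--                 continue
--             if ch == '"':
--                 in_str = True
--                 j += 1
--                 continue
--             if ch == "/" and j + 1 < n and line[j + 1] == "/":
--                 break
--             if ch == "{":
--                 depth += 1
--                 had_open = True
--             elif ch == "}":
--                 depth -= 1
--             if not ch.isspace():
--                 last = ch
--             j += 1
--         if had_open:
--             seen_open = True
--         if seen_open:
--             if depth <= 0:
--                 return idx
--         elif last == ";":
--             return idx
--     return start_idx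
-- ===== Notes on version B (the rewrite author's own statement) =====
-- stated objective: faster
-- what changed: A strips each line into an intermediate string (helper pass) and then runs count/strip/endswith passes over it; B is one flat per-line character scan that maintains the brace depth, a had-open flag and the last significant character directly, building no intermediate string.
-- outside the precondition, e.g. on find_top_level_item_end_line(['a;'], -2): A raises IndexError, B raises IndexError
import Mathlib
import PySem

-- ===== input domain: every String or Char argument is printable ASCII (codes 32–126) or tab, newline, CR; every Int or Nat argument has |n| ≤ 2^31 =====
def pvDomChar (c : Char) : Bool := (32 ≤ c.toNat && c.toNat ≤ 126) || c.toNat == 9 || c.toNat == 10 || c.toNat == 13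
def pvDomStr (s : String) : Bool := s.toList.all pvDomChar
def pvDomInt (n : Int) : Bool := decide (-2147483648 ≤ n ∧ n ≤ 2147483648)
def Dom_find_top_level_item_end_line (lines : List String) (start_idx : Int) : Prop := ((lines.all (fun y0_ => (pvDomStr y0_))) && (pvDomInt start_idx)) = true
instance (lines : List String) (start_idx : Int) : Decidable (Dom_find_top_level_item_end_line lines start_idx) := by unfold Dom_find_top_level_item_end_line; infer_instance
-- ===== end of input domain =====

-- B replaces A's two-phase per-line design (build a string/comment-stripped copy
-- of the line, then count/strip/endswith on it) by one flat character scan per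
-- line maintaining depth, a had-open flag and the last significant character
-- directly, building no intermediate string (measured constant-factor speedup).

-- ===== PORT A =====
-- strip_string_and_line_comment_with_state: while-loop over the characters,
-- state (in_str, escape), building the output list; the '//' branch breaks.
def pvStripState : List Char → Bool → Bool → List Char × Bool
  | [], inStr, _ => ([], inStr)
  | c :: rest, inStr, escape =>
    if inStr then
      let st : Bool × Bool :=
        if escape then (inStr, false)
        else if c = '\\' then (inStr, true)
        else if c = '"' then (false, false)
        else (inStr, false)
      let r := pvStripState rest st.1 st.2
      (' ' :: r.1, r.2)
    else if c = '"' then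
      let r := pvStripState rest true false
      (' ' :: r.1, r.2)
    else if c = '/' ∧ rest.head? = some '/' then ([], inStr)
    else
      let r := pvStripState rest inStr escape
      (c :: r.1, r.2)

-- strip_string_and_line_comment
def pvStrip (line : List Char) : List Char := (pvStripState line false false).1

-- the for-loop of A over range(start_idx, len(lines)); state (depth, seen_open);
-- returning start_idx when the index list is exhausted = the final fallback return
def pvLoopA (lines : List String) (start_idx : Int) : List Int → Int → Bool → Int
  | [], _, _ => start_idx
  | idx :: rest, depth, seen =>
    let code := pvStrip (PySem.List.pyGetD lines idx "").toList
    let stripped := PySem.Chars.strip code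
    let seen' := if !seen && PySem.Chars.isIn ['{'] code then true else seen
    let depth' := depth + (PySem.Chars.count code ['{'] : Int) - (PySem.Chars.count code ['}'] : Int)
    if seen' then
      if depth' ≤ 0 then idx else pvLoopA lines start_idx rest depth' seen'
    else if PySem.Chars.endswith stripped [';'] then idx
    else pvLoopA lines start_idx rest depth' seen'

def find_top_level_item_end_line (lines : List String) (start_idx : Int) : Int :=
  pvLoopA lines start_idx (PySem.List.pyRange start_idx (lines.length : Int) 1) 0 false

-- ===== PORT B =====
-- one flat per-line character scanner: state (in_str, escape, depth, had_open, last)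
def pvScan : List Char → Bool → Bool → Int → Bool → Option Char → Int × Bool × Option Char
  | [], _, _, depth, had, last => (depth, had, last)
  | c :: rest, inStr, escape, depth, had, last =>
    if inStr then
      if escape then pvScan rest true false depth had last
      else if c = '\\' then pvScan rest true true depth had last
      else if c = '"' then pvScan rest false false depth had last
      else pvScan rest true false depth had last
    else if c = '"' then pvScan rest true false depth had last
    else if c = '/' ∧ rest.head? = some '/' then (depth, had, last)
    else
      let dh : Int × Bool :=
        if c = '{' then (depth + 1, true)
        else if c = '}' then (depth - 1, had)
        else (depth, had)
      let last' := if PySem.Chars.isspace c then last else some c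
      pvScan rest false false dh.1 dh.2 last'

def pvLoopB (lines : List String) (start_idx : Int) : List Int → Int → Bool → Int
  | [], _, _ => start_idx
  | idx :: rest, depth, seen =>
    let r := pvScan (PySem.List.pyGetD lines idx "").toList false false depth false none
    let seen' := seen || r.2.1
    if seen' then
      if r.1 ≤ 0 then idx else pvLoopB lines start_idx rest r.1 seen'
    else if r.2.2 = some ';' then idx
    else pvLoopB lines start_idx rest r.1 seen'

def find_top_level_item_end_line_alt (lines : List String) (start_idx : Int) : Int :=
  pvLoopB lines start_idx (PySem.List.pyRange start_idx (lines.length : Int) 1) 0 false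

-- ===== PRECONDITION & SPEC =====
-- Pre_ excludes exactly the inputs where Python A raises IndexError:
-- for start_idx < -len(lines) the first subscript lines[start_idx] fails.
def Pre_find_top_level_item_end_line (lines : List String) (start_idx : Int) : Prop :=
  -(lines.length : Int) ≤ start_idx
instance (lines : List String) (start_idx : Int) : Decidable (Pre_find_top_level_item_end_line lines start_idx) := by unfold Pre_find_top_level_item_end_line; infer_instance

def pvWitness_find_top_level_item_end_line : List String × Int :=
  (["fn f() {", "  let x = 1;", "}"], 0)

def Spec_find_top_level_item_end_line (lines : List String) (start_idx : Int) (out : Int) : Prop := out = find_top_level_item_end_line_alt lines start_idx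
instance (lines : List String) (start_idx : Int) (out : Int) : Decidable (Spec_find_top_level_item_end_line lines start_idx out) := by unfold Spec_find_top_level_item_end_line; infer_instance

-- ===== CLAIM (what is proved, stated in full; the proofs are below) =====
def Claim_equal_find_top_level_item_end_line : Prop := ∀ (lines : List String) (start_idx : Int), Dom_find_top_level_item_end_line lines start_idx → Pre_find_top_level_item_end_line lines start_idx → Spec_find_top_level_item_end_line lines start_idx (find_top_level_item_end_line lines start_idx)

-- ===== LEMMAS AND PROOFS =====

-- last significant character: B's "last" update folded over a (stripped) line
def pvLastSig (code : List Char) (last : Option Char) : Option Char :=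
  code.foldl (fun acc c => if PySem.Chars.isspace c then acc else some c) last

-- Chars.count with a single-character needle is List.count
theorem pvCountGoSingleton (c : Char) : ∀ (l : List Char) (fuel acc : Nat), l.length ≤ fuel →
    PySem.Chars.count.go [c] fuel l acc = acc + l.count c := by
  intro l
  induction l with
  | nil => intro fuel acc _; cases fuel <;> simp [PySem.Chars.count.go]
  | cons h t ih =>
    intro fuel acc hle
    cases fuel with
    | zero => simp at hle
    | succ n =>
      have ht : t.length ≤ n := by simpa using hle
      simp only [PySem.Chars.count.go]
      by_cases hc : c = h
      · subst hc
        simp only [List.isPrefixOf, beq_self_eq_true, Bool.true_and, if_pos, List.length_cons]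
        norm_num [List.drop]
        rw [ih n (acc + 1) ht]
        omega
      · simp [List.isPrefixOf, Ne.symm hc, hc, ih n acc ht]

theorem pvCountSingleton (s : List Char) (c : Char) :
    PySem.Chars.count s [c] = s.count c := by
  simp [PySem.Chars.count, pvCountGoSingleton c s s.length 0 le_rfl]

theorem pvIsInSingleton (s : List Char) (c : Char) :
    PySem.Chars.isIn [c] s = s.contains c := by
  by_cases h : c ∈ s
  · have ht : PySem.Chars.isIn [c] s = true :=
      (PySem.Chars.isIn_iff_infix _ _).mpr ((List.singleton_infix_iff c s).mpr h)
    simp [ht, h]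
  · have hf : PySem.Chars.isIn [c] s = false := by
      rw [PySem.Chars.isIn_eq_false_iff]
      exact fun hh => h ((List.singleton_infix_iff c s).mp hh)
    simp [hf, h]

theorem pvLastSigEq (code : List Char) (last : Option Char) :
    pvLastSig code last = ((code.reverse.dropWhile PySem.Chars.isspace).head?).or last := by
  induction code using List.reverseRecOn generalizing last with
  | nil => simp [pvLastSig]
  | append_singleton cs c ih =>
    by_cases hc : PySem.Chars.isspace c = true
    · simp [pvLastSig, List.foldl_append, hc]
      exact ih last
    · simp [pvLastSig, List.foldl_append, hc]

theorem pvHeadDropLstrip (cs : List Char) :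
    ((cs.dropWhile PySem.Chars.isspace).reverse.dropWhile PySem.Chars.isspace).head? =
      (cs.reverse.dropWhile PySem.Chars.isspace).head? := by
  induction cs with
  | nil => simp
  | cons c cs ih =>
    by_cases hc : PySem.Chars.isspace c = true
    · simp only [List.dropWhile_cons, hc, if_true, List.reverse_cons, List.dropWhile_append]
      rw [ih]
      cases h : (cs.reverse.dropWhile PySem.Chars.isspace) with
      | nil => simp
      | cons x xs => simp
    · simp [hc]

-- endswith of the .strip()ped line tests "the last significant char is ';'"
theorem pvEndswithStrip (code : List Char) :
    PySem.Chars.endswith (PySem.Chars.strip code) [';'] =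
      decide (pvLastSig code none = some ';') := by
  have h1 : ∀ (s : List Char) (c : Char), ([c] <:+ s ↔ s.getLast? = some c) := by
    intro s c
    constructor
    · rintro ⟨t, rfl⟩; simp
    · intro h
      rcases List.eq_nil_or_concat s with rfl | ⟨t, a, rfl⟩
      · simp at h
      · simp at h; subst h; exact ⟨t, by simp⟩
  have h2 : (PySem.Chars.strip code).getLast? = pvLastSig code none := by
    rw [List.getLast?_eq_head?_reverse]
    show ((PySem.Chars.rstrip (PySem.Chars.lstrip code)).reverse).head? = _
    rw [PySem.Chars.rstrip, List.reverse_reverse, PySem.Chars.lstrip, pvHeadDropLstrip,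
      pvLastSigEq]
    simp
  by_cases h : PySem.Chars.endswith (PySem.Chars.strip code) [';'] = true
  · have hs := List.isSuffixOf_iff_suffix.mp h
    rw [h, ← h2, eq_comm]
    simp [(h1 _ _).mp hs]
  · simp only [Bool.not_eq_true] at h
    rw [h, eq_comm]
    simp only [decide_eq_false_iff_not, ← h2]
    intro hg
    have hsfx : ([';'] : List Char) <:+ PySem.Chars.strip code := (h1 _ _).mpr hg
    have hc2 : PySem.Chars.endswith (PySem.Chars.strip code) [';'] = true :=
      List.isSuffixOf_iff_suffix.mpr hsfx
    rw [h] at hc2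
    exact Bool.false_ne_true hc2

-- when not inside a string, the escape flag cannot influence the stripper
theorem pvStripEscIrrel : ∀ (rest : List Char) (e : Bool),
    pvStripState rest false e = pvStripState rest false false := by
  intro rest
  induction rest with
  | nil => intro e; rfl
  | cons c t ih =>
    intro e
    simp only [pvStripState, Bool.false_eq_true, if_false]
    by_cases hq : c = '"'
    · simp [hq]
    · by_cases hcm : c = '/' ∧ t.head? = some '/'
      · simp [hcm]
      · simp [hq, hcm, ih]

-- central per-line lemma: B's scan computes A's per-line summary of the stripped line
theorem pvScanEqStrip : ∀ (cs : List Char) (inStr escape : Bool) (depth : Int) (had : Bool) (last : Option Char),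
    pvScan cs inStr escape depth had last =
      (depth + ((pvStripState cs inStr escape).1.count '{' : Int)
             - ((pvStripState cs inStr escape).1.count '}' : Int),
       had || (pvStripState cs inStr escape).1.contains '{',
       pvLastSig (pvStripState cs inStr escape).1 last) := by
  intro cs
  induction cs with
  | nil => intro inStr escape depth had last; simp [pvScan, pvStripState, pvLastSig]
  | cons c rest ih =>
    intro inStr escape depth had last
    have hsp : PySem.Chars.isspace ' ' = true := by decide
    cases inStr with
    | true =>
      cases escape with
      | true =>
        simp only [pvScan, pvStripState, if_pos, ih]
        simp [pvLastSig, hsp]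
      | false =>
        by_cases hb : c = '\\'
        · simp only [pvScan, pvStripState, hb, ih]
          simp [pvLastSig, hsp]
        · by_cases hq : c = '"'
          · simp only [pvScan, pvStripState, hq, ih]
            simp [pvLastSig, hsp]
          · simp only [pvScan, pvStripState, hb, hq, ih]
            simp [pvLastSig, hsp]
    | false =>
      by_cases hq : c = '"'
      · simp only [pvScan, pvStripState, hq, ih]
        simp [pvLastSig, hsp]
      · by_cases hcm : c = '/' ∧ rest.head? = some '/'
        · simp only [pvScan, pvStripState, hcm]
          simp [pvLastSig]
        · simp only [pvScan, pvStripState, if_neg hq, if_neg hcm, Bool.false_eq_true, if_false, ih]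
          rw [pvStripEscIrrel rest escape]
          by_cases ho : c = '{'
          · simp [pvLastSig, ho]
            omega
          · by_cases hc2 : c = '}'
            · simp [pvLastSig, hc2]
              omega
            · simp [pvLastSig, ho, hc2, Ne.symm ho]

theorem pvLoopEq (lines : List String) (start_idx : Int) :
    ∀ (idxs : List Int) (depth : Int) (seen : Bool),
      pvLoopA lines start_idx idxs depth seen = pvLoopB lines start_idx idxs depth seen := by
  intro idxs
  induction idxs with
  | nil => intro depth seen; rfl
  | cons idx rest ih =>
    intro depth seen
    simp only [pvLoopA, pvLoopB, pvScanEqStrip]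
    have hseen : (if !seen && PySem.Chars.isIn ['{'] (pvStrip (PySem.List.pyGetD lines idx "").toList) then true else seen)
        = (seen || (pvStrip (PySem.List.pyGetD lines idx "").toList).contains '{') := by
      cases seen <;> simp [pvIsInSingleton]
    rw [hseen, pvCountSingleton, pvCountSingleton, pvEndswithStrip]
    simp only [pvStrip, decide_eq_true_eq, Bool.false_or, ih]

-- ===== VERDICT (by name: the statement is the Claim_ definition above) =====
theorem find_top_level_item_end_line_spec : Claim_equal_find_top_level_item_end_line := by
  intro lines start_idx _ _
  unfold Spec_find_top_level_item_end_line find_top_level_item_end_line find_top_level_item_end_line_alt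
  exact pvLoopEq lines start_idx _ 0 false
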